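-- pv_equiv track=rewrite | github.com/Ritanlisa/Nanite-Tokenizers | rag/logprob_keyword_extractor.py | _has_disallowed_punctuation_for_bpe
-- ===== SOURCE A (Python) =====
-- import unicodedata
-- from typing import Any, Callable, Dict, List, Optional, Set, Tuple
--
-- CONNECT_INCLUDE_CHARS = {"·", "・", "･", "-", "'", "’", "."}
--
-- CONNECT_EXCEPTION_CHARS = {" ", "\n", "\t", "\r", "<br>"}
--
-- def _strip_known_connect_markers_for_bpe(token: str) -> str:
--     text = str(token or "")
--     if not text:
--         return ""
--
--     markers = sorted(
--         {*(str(item) for item in CONNECT_INCLUDE_CHARS if str(item)), *(str(item) for item in CONNECT_EXCEPTION_CHARS if str(item))},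
--         key=len,
--         reverse=True,
--     )
--     if not markers:
--         return text
--
--     parts: List[str] = []
--     idx = 0
--     n = len(text)
--     while idx < n:
--         matched = False
--         for marker in markers:
--             if text.startswith(marker, idx):
--                 idx += len(marker)
--                 matched = True
--                 break
--         if matched:
--             continue
--         parts.append(text[idx])
--         idx += 1
--     return "".join(parts)
--
-- def _has_disallowed_punctuation_for_bpe(token: str) -> bool:
--     text = _strip_known_connect_markers_for_bpe(token)
--     if not text:
--         return False
--     for char in text:
--         if unicodedata.category(char).startswith("P"):
--             return True
--     return False
-- ===== SOURCE B (Python) =====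
-- import unicodedata
--
-- CONNECT_INCLUDE_CHARS = {"·", "・", "･", "-", "'", "’", "."}
--
-- CONNECT_EXCEPTION_CHARS = {" ", "\n", "\t", "\r", "<br>"}
--
-- # All printable-ASCII punctuation characters that are not connect markers,
-- # computed once; the token is then probed for each of them by substring test.
-- _DISALLOWED_ASCII_PUNCT = frozenset(
--     c for c in map(chr, range(32, 127))
--     if unicodedata.category(c).startswith("P")
--     and c not in (CONNECT_INCLUDE_CHARS | CONNECT_EXCEPTION_CHARS)
-- )
--
-- def _has_disallowed_punctuation_for_bpe(token: str) -> bool: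
--     # Inverted traversal: instead of scanning the (stripped) token character by
--     # character, ask for each disallowed punctuation character whether it occurs
--     # anywhere in the raw token. Stripping is unnecessary because no marker
--     # contains a disallowed punctuation character. Exact on the printable-ASCII
--     # (plus tab/newline/CR) domain.
--     text = str(token or "")
--     return any(p in text for p in _DISALLOWED_ASCII_PUNCT)
-- ===== Notes on version B (the rewrite author's own statement) =====
-- stated objective: faster
-- what changed: B inverts the traversal: instead of A's greedy marker-stripping loop that builds a stripped string and then scans it character by character, B precomputes the fixed set of non-marker ASCII punctuation characters once and returns whether any of them occurs in the raw token via substring probes; stripping is unnecessary because no marker contains a disallowed punctuation character.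
import Mathlib
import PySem

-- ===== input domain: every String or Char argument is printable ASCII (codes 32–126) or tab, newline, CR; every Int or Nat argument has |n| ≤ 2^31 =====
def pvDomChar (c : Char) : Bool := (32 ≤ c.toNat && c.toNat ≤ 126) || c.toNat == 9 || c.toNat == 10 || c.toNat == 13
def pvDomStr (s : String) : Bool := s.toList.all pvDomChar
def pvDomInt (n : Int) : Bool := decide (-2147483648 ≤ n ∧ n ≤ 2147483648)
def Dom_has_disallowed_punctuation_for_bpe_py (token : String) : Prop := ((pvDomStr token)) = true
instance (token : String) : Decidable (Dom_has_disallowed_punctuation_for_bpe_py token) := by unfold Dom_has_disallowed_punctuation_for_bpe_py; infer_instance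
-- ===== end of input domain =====

-- B inverts the traversal: instead of building A's stripped string and scanning it, it probes
-- the raw token for each fixed disallowed punctuation character (objective: faster; measured).


-- ===== PORT A =====
-- unicodedata.category(c).startswith("P") for a character in the domain (printable
-- ASCII or tab/newline/CR): exactly the ASCII characters of Unicode category P*.
def pvIsPunct (c : Char) : Bool :=
  ['!', '"', '#', '%', '&', '\'', '(', ')', '*', ',', '-', '.', '/', ':', ';',
   '?', '@', '[', '\\', ']', '_', '{', '}'].contains c

-- The single-character markers of CONNECT_INCLUDE_CHARS ∪ CONNECT_EXCEPTION_CHARS.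
def pvSingleMarkers : List Char :=
  ['·', '・', '･', '-', '\'', '’', '.', ' ', '\n', '\t', '\r']

-- A's while-loop: markers sorted by length descending put the unique multi-char
-- marker "<br>" first (startswith = the 4-char pattern), then the single chars.
def pvStripLoop : List Char → List Char
  | [] => []
  | c :: cs =>
      if c = '<' ∧ cs.take 3 = ['b', 'r', '>'] then pvStripLoop (cs.drop 3)
      else if pvSingleMarkers.contains c then pvStripLoop cs
      else c :: pvStripLoop cs
  termination_by cs => cs.length
  decreasing_by
  · simp only [List.length_cons, List.length_drop]; omega
  · simp
  · simp

-- _strip_known_connect_markers_for_bpe (str(token or "") = token for a str argument;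
-- the 'if not text: return ""' early exit coincides with the loop's [] result).
def pvStripKnownConnectMarkers (token : String) : List Char :=
  pvStripLoop token.toList

def has_disallowed_punctuation_for_bpe_py (token : String) : Bool :=
  let text := pvStripKnownConnectMarkers token
  if text.isEmpty then false
  else text.any pvIsPunct

-- ===== PORT B =====
-- Source B's module constant: the printable-ASCII punctuation characters that are not
-- connect markers (the frozenset _DISALLOWED_ASCII_PUNCT, as computed by Source B).
def pvDisallowedPunct : List Char :=
  ['!', '"', '#', '%', '&', '(', ')', '*', ',', '/', ':', ';',
   '?', '@', '[', '\\', ']', '_', '{', '}']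

-- Source B: any(p in text for p in _DISALLOWED_ASCII_PUNCT); each p is a single
-- character, so the Python substring test 'p in text' is character membership.
def has_disallowed_punctuation_for_bpe_py_alt (token : String) : Bool :=
  pvDisallowedPunct.any (fun p => token.toList.contains p)

-- ===== PRECONDITION & SPEC =====
def Spec_has_disallowed_punctuation_for_bpe_py (token : String) (out : Bool) : Prop := out = has_disallowed_punctuation_for_bpe_py_alt token
instance (token : String) (out : Bool) : Decidable (Spec_has_disallowed_punctuation_for_bpe_py token out) := by unfold Spec_has_disallowed_punctuation_for_bpe_py; infer_instance

-- ===== CLAIM (what is proved, stated in full; the proofs are below) =====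
def Claim_equal_has_disallowed_punctuation_for_bpe_py : Prop := ∀ (token : String), Dom_has_disallowed_punctuation_for_bpe_py token → Spec_has_disallowed_punctuation_for_bpe_py token (has_disallowed_punctuation_for_bpe_py token)

-- ===== LEMMAS AND PROOFS =====

-- Scanning the stripped list for punctuation equals scanning the raw list while
-- skipping the allowed single characters: the '<br>' marker consists of the four
-- non-allowed, non-punctuation characters '<' 'b' 'r' '>'.
theorem pvStripLoop_any (cs : List Char) :
    (pvStripLoop cs).any pvIsPunct
      = cs.any (fun c => !(pvSingleMarkers.contains c) && pvIsPunct c) := by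
  induction cs using pvStripLoop.induct with
  | case1 => simp [pvStripLoop]
  | case2 c cs hbr ih =>
      have hcs : cs = 'b' :: 'r' :: '>' :: cs.drop 3 := by
        conv_lhs => rw [← List.take_append_drop 3 cs]
        rw [hbr.2]; rfl
      rw [pvStripLoop, if_pos hbr, hbr.1]
      conv_rhs => rw [hcs]
      simp [ih, pvSingleMarkers, pvIsPunct]
  | case3 c cs hbr hc ih =>
      rw [pvStripLoop, if_neg hbr, if_pos hc]
      have hm : c ∈ pvSingleMarkers := by simpa using hc
      simp [hm, ih]
  | case4 c cs hbr hc ih =>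
      rw [pvStripLoop, if_neg hbr, if_neg hc]
      have hm : c ∉ pvSingleMarkers := by simpa using hc
      simp [hm, ih]

-- A character is non-marker punctuation exactly when it is in B's fixed list:
-- pvDisallowedPunct is pvIsPunct's list with the three marker characters removed.
theorem pvMarker_punct_iff (c : Char) :
    (!(pvSingleMarkers.contains c) && pvIsPunct c) = pvDisallowedPunct.contains c := by
  by_cases h : pvIsPunct c = true
  · simp only [pvIsPunct, List.contains_eq_mem, decide_eq_true_eq, List.mem_cons,
      List.not_mem_nil, or_false] at h
    rcases h with rfl|rfl|rfl|rfl|rfl|rfl|rfl|rfl|rfl|rfl|rfl|rfl|rfl|rfl|rfl|rfl|rfl|rfl|rfl|rfl|rfl|rfl|rfl <;> decide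
  · have h2 : pvDisallowedPunct.contains c = false := by
      by_contra h2
      have h3 := Bool.of_not_eq_false h2
      simp only [pvDisallowedPunct, List.contains_eq_mem, decide_eq_true_eq, List.mem_cons,
        List.not_mem_nil, or_false] at h3
      apply h
      rcases h3 with rfl|rfl|rfl|rfl|rfl|rfl|rfl|rfl|rfl|rfl|rfl|rfl|rfl|rfl|rfl|rfl|rfl|rfl|rfl|rfl <;> decide
    simp only [List.contains_eq_mem, decide_eq_false_iff_not] at h2
    simp [h, h2]

-- Two ways to say 'some character of cs lies in ds'.
theorem pvAny_mem_comm (cs ds : List Char) :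
    cs.any (fun c => ds.contains c) = ds.any (fun d => cs.contains d) := by
  rw [Bool.eq_iff_iff]
  simp only [List.any_eq_true, List.contains_eq_mem, decide_eq_true_eq]
  exact ⟨fun ⟨c, h1, h2⟩ => ⟨c, h2, h1⟩, fun ⟨c, h1, h2⟩ => ⟨c, h2, h1⟩⟩

-- ===== VERDICT (by name: the statement is the Claim_ definition above) =====
theorem has_disallowed_punctuation_for_bpe_py_spec : Claim_equal_has_disallowed_punctuation_for_bpe_py := by
  intro token _
  unfold Spec_has_disallowed_punctuation_for_bpe_py
  unfold has_disallowed_punctuation_for_bpe_py has_disallowed_punctuation_for_bpe_py_alt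
    pvStripKnownConnectMarkers
  have key : (pvStripLoop token.toList).any pvIsPunct
      = pvDisallowedPunct.any (fun p => token.toList.contains p) := by
    rw [pvStripLoop_any, ← pvAny_mem_comm]
    simp only [pvMarker_punct_iff]
  rcases h : pvStripLoop token.toList with _ | ⟨c, cs⟩
  · rw [h] at key; simpa [List.isEmpty] using key
  · rw [h] at key; simpa [List.isEmpty] using key
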